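-- pv_equiv track=rewrite | github.com/youhavetopay/Algorithm | Programmers/고득점kit/해시/kit03.py | solution
-- ===== SOURCE A (Python) =====
-- def solution(clothes):
--     dic1 = {}
--     emptyList = []
--     for tempList in clothes:
--         if dic1.get(tempList[1]):
--             dic1[tempList[1]].append(tempList[0])
--         else:
--             dic1[tempList[1]] = []
--             dic1[tempList[1]].append(tempList[0])
--
--     if len(dic1) == 1:
--         return len(dic1[list(dic1.keys())[0]])
--
--     else:
--         totalValue = 0
--         for i in range(0, len(list(dic1.values()))):
--             totalValue += len(list(dic1.values())[i])
--         tempValue = 1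
--         for i in range(0, len(list(dic1.values()))):
--             tempValue *= len(list(dic1.values())[i])
--
--         return (totalValue+tempValue)
-- ===== SOURCE B (Python) =====
-- def solution(clothes):
--     cats = sorted(c[1] for c in clothes)
--     counts = []
--     prev = None
--     run = 0
--     for cat in cats:
--         if cat == prev:
--             run += 1
--         else:
--             if run > 0:
--                 counts.append(run)
--             prev = cat
--             run = 1
--     if run > 0:
--         counts.append(run)
--     if len(counts) == 1:
--         return counts[0]
--     total = 0
--     prod = 1
--     for n in counts:
--         total += n
--         prod *= n
--     return total + prod
-- ===== Notes on version B (the rewrite author's own statement) =====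
-- stated objective: alternative
-- what changed: Replaces A's dict-of-name-lists grouping plus two index loops over list(dic1.values()) with sort-then-run-length counting of the categories, combined in a single pass.
import Mathlib
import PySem

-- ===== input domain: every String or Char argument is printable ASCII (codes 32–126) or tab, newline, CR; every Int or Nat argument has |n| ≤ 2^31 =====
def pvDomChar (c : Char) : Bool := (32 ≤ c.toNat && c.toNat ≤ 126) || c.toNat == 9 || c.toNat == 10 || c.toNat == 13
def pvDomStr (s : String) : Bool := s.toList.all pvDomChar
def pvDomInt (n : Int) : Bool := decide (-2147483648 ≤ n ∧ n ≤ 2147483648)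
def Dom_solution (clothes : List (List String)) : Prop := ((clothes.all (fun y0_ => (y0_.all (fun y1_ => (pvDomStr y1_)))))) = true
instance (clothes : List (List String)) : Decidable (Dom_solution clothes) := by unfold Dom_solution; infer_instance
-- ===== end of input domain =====

-- B replaces A's dict-of-name-lists grouping and its two index loops over list(dic1.values())
-- with sort-then-run-length counting of the categories, combined in a single pass.

-- ===== PORT A =====
-- the body of A's grouping loop ('if dic1.get(...)' tests Python truthiness: non-empty list)
def solutionStepA (d : PySem.Dict String (List String)) (tempList : List String) :
    PySem.Dict String (List String) :=
  let k := (PySem.List.pyGet? tempList 1).getD ""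
  let v := (PySem.List.pyGet? tempList 0).getD ""
  match d.get? k with
  | some l => if l ≠ [] then d.insert k (l ++ [v]) else d.insert k ([] ++ [v])
  | none   => d.insert k ([] ++ [v])

def solution (clothes : List (List String)) : Int :=
  let dic1 := clothes.foldl solutionStepA PySem.Dict.empty
  if dic1.size = 1 then
    (((dic1.get? ((PySem.List.pyGet? dic1.keys 0).getD "")).getD []).length : Int)
  else
    let totalValue : Int :=
      (PySem.List.pyRange 0 (dic1.values.length : Int) 1).foldl
        (fun acc i => acc + ((PySem.List.pyGetD dic1.values i []).length : Int)) 0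
    let tempValue : Int :=
      (PySem.List.pyRange 0 (dic1.values.length : Int) 1).foldl
        (fun acc i => acc * ((PySem.List.pyGetD dic1.values i []).length : Int)) 1
    totalValue + tempValue

-- ===== PORT B =====
-- the body of B's run-length loop; state = (counts, prev, run)
def solutionStepB (s : List Int × Option String × Int) (cat : String) :
    List Int × Option String × Int :=
  if (match s.2.1 with | some p => cat == p | none => false) then (s.1, s.2.1, s.2.2 + 1)
  else ((if s.2.2 > 0 then s.1 ++ [s.2.2] else s.1), some cat, 1)

def solution_alt (clothes : List (List String)) : Int :=
  let cats := PySem.List.sorted (clothes.map (fun c => (PySem.List.pyGet? c 1).getD "")) (fun x => x) false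
  let s := cats.foldl solutionStepB ([], none, 0)
  let counts := if s.2.2 > 0 then s.1 ++ [s.2.2] else s.1
  if counts.length = 1 then (PySem.List.pyGet? counts 0).getD 0
  else
    let tp := counts.foldl (fun (a : Int × Int) n => (a.1 + n, a.2 * n)) (0, 1)
    tp.1 + tp.2

-- ===== PRECONDITION & SPEC =====
-- A raises IndexError (tempList[1]) when some inner list has fewer than 2 elements; excluded.
def Pre_solution (clothes : List (List String)) : Prop :=
  ∀ l ∈ clothes, 2 ≤ l.length
instance (clothes : List (List String)) : Decidable (Pre_solution clothes) := by
  unfold Pre_solution; infer_instance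
def pvWitness_solution : List (List String) := [["a", "hat"], ["b", "hat"], ["c", "shoe"]]

def Spec_solution (clothes : List (List String)) (out : Int) : Prop := out = solution_alt clothes
instance (clothes : List (List String)) (out : Int) : Decidable (Spec_solution clothes out) := by unfold Spec_solution; infer_instance

-- ===== CLAIM (what is proved, stated in full; the proofs are below) =====
def Claim_equal_solution : Prop := ∀ (clothes : List (List String)), Dom_solution clothes → Pre_solution clothes → Spec_solution clothes (solution clothes)

-- ===== LEMMAS AND PROOFS =====

def keyF (c : List String) : String := (PySem.List.pyGet? c 1).getD ""
def valF (c : List String) : String := (PySem.List.pyGet? c 0).getD ""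
def finishB (s : List Int × Option String × Int) : List Int :=
  if s.2.2 > 0 then s.1 ++ [s.2.2] else s.1

theorem stepA_eq_modify (d : PySem.Dict String (List String)) (x : List String) :
    solutionStepA d x = d.modify (keyF x) [] (fun l => l ++ [valF x]) := by
  have hm : d.modify (keyF x) [] (fun l => l ++ [valF x])
      = d.insert (keyF x) (d.getD (keyF x) [] ++ [valF x]) := rfl
  rw [hm, PySem.Dict.getD_eq_get?_getD]
  unfold solutionStepA keyF valF
  cases h : d.get? ((PySem.List.pyGet? x 1).getD "") with
  | none => simp [h]
  | some l => cases l with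
    | nil => simp [h]
    | cons a t => simp [h]

theorem A_dict_eq (clothes : List (List String)) :
    clothes.foldl solutionStepA PySem.Dict.empty
      = (clothes.map (fun c => (keyF c, valF c))).foldl
          (fun d p => d.modify p.1 [] (fun x => x ++ [p.2])) PySem.Dict.empty := by
  rw [List.foldl_map]
  have : solutionStepA = fun d c => PySem.Dict.modify d (keyF c) [] (fun x => x ++ [valF c]) :=
    funext fun d => funext fun c => stepA_eq_modify d c
  rw [this]

theorem A_len (clothes : List (List String)) (c : String) :
    ((clothes.foldl solutionStepA PySem.Dict.empty).getD c []).length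
      = (clothes.map keyF).count c := by
  rw [A_dict_eq, PySem.Dict.getD_foldl_modify_append]
  simp [List.count, ← List.countP_eq_length_filter, List.countP_map, Function.comp_def]

theorem A_keys (clothes : List (List String)) :
    (clothes.foldl solutionStepA PySem.Dict.empty).keys
      = PySem.Set.ofList (clothes.map keyF) := by
  rw [A_dict_eq, PySem.Dict.keys_foldl_modify_key _ Prod.fst []
    (fun _ p => fun x => x ++ [p.2])]
  simp [PySem.Set.update_nil_left, List.map_map, Function.comp_def]

theorem foldl_add0 (l : List Int) (s : Int) :
    l.foldl (fun a n => a + n) s = s + l.sum := by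
  induction l generalizing s with
  | nil => simp
  | cons x xs ih => simp [ih, add_assoc]

theorem foldl_mul1 (l : List Int) (s : Int) :
    l.foldl (fun a n => a * n) s = s * l.prod := by
  induction l generalizing s with
  | nil => simp
  | cons x xs ih => simp [ih, mul_assoc]

theorem B_run (l : List String) (x : String) (cs : List Int) (r : Int)
    (hs : l.Pairwise (· ≤ ·)) (hge : ∀ y ∈ l, x ≤ y) (hr : 0 < r) :
    ∃ K : List String, K.Nodup ∧ (∀ y, y ∈ K ↔ (y ∈ l ∧ y ≠ x)) ∧
      finishB (l.foldl solutionStepB (cs, some x, r))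
        = cs ++ (r + (l.count x : Int)) :: K.map (fun k => (l.count k : Int)) := by
  induction l generalizing x cs r with
  | nil =>
    refine ⟨[], by simp, by simp, ?_⟩
    simp [finishB, hr]
  | cons y ys ih =>
    rcases hs with _ | ⟨hy, hs'⟩
    by_cases hyx : y = x
    · subst hyx
      have hstep : solutionStepB (cs, some y, r) y = (cs, some y, r + 1) := by
        simp [solutionStepB]
      obtain ⟨K, hnd, hmem, heq⟩ := ih y cs (r + 1) hs' hy (by omega)
      refine ⟨K, hnd, ?_, ?_⟩
      · intro z
        rw [hmem]
        constructor
        · rintro ⟨hz, hne⟩; exact ⟨List.mem_cons_of_mem _ hz, hne⟩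
        · rintro ⟨hz, hne⟩
          rcases List.mem_cons.mp hz with h | h
          · exact absurd h hne
          · exact ⟨h, hne⟩
      · rw [List.foldl_cons, hstep, heq]
        congr 1
        congr 1
        · rw [List.count_cons_self]; push_cast; ring
        · apply List.map_congr_left
          intro k hk
          have hne : k ≠ y := (hmem k |>.1 hk).2
          simp [hne.symm]
    · have hxy : x < y := lt_of_le_of_ne (hge y List.mem_cons_self) (Ne.symm hyx)
      have hstep : solutionStepB (cs, some x, r) y = (cs ++ [r], some y, 1) := by
        simp [solutionStepB, hyx, hr]
      obtain ⟨K, hnd, hmem, heq⟩ := ih y (cs ++ [r]) 1 hs' hy one_pos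
      have hxnot : ∀ z ∈ y :: ys, z ≠ x := by
        intro z hz h'
        have hx' : x ∈ y :: ys := h' ▸ hz
        rcases List.mem_cons.mp hx' with h | h
        · exact hyx h.symm
        · exact absurd (hy x h) (not_le.mpr hxy)
      refine ⟨y :: K, ?_, ?_, ?_⟩
      · refine List.nodup_cons.mpr ⟨?_, hnd⟩
        intro hyK; exact (hmem y |>.1 hyK).2 rfl
      · intro z
        constructor
        · intro hz
          rcases List.mem_cons.mp hz with h | h
          · subst h; exact ⟨List.mem_cons_self, hxnot z (by simp)⟩
          · obtain ⟨hz', hne⟩ := (hmem z).1 h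
            exact ⟨List.mem_cons_of_mem _ hz', hxnot z (List.mem_cons_of_mem _ hz')⟩
        · rintro ⟨hz, _⟩
          rcases List.mem_cons.mp hz with h | h
          · subst h; exact List.mem_cons_self
          · by_cases hzy : z = y
            · subst hzy; exact List.mem_cons_self
            · exact List.mem_cons_of_mem _ ((hmem z).2 ⟨h, hzy⟩)
      · rw [List.foldl_cons, hstep, heq]
        have hx0 : (y :: ys).count x = 0 := by
          rw [List.count_eq_zero]
          intro hmemx; exact hxnot x hmemx rfl
        rw [hx0]
        have hK : K.map (fun k => (ys.count k : Int))
            = K.map (fun k => ((y :: ys).count k : Int)) := by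
          apply List.map_congr_left
          intro k hk
          have hne : k ≠ y := (hmem k |>.1 hk).2
          simp [hne.symm]
        simp only [List.map_cons, hK]
        rw [List.append_assoc, List.singleton_append]
        congr 2
        · push_cast; ring
        · congr 1
          rw [List.count_cons_self]; push_cast; ring

theorem B_main (l : List String) (hs : l.Pairwise (· ≤ ·)) :
    ∃ K : List String, K.Nodup ∧ (∀ y, y ∈ K ↔ y ∈ l) ∧
      finishB (l.foldl solutionStepB ([], none, 0))
        = K.map (fun k => (l.count k : Int)) := by
  cases l with
  | nil => exact ⟨[], by simp, by simp, by simp [finishB]⟩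
  | cons x xs =>
    rcases hs with _ | ⟨hx, hs'⟩
    have hstep : solutionStepB ([], none, 0) x = ([], some x, 1) := by
      simp [solutionStepB]
    obtain ⟨K, hnd, hmem, heq⟩ := B_run xs x [] 1 hs' hx one_pos
    refine ⟨x :: K, ?_, ?_, ?_⟩
    · refine List.nodup_cons.mpr ⟨?_, hnd⟩
      intro hxK; exact (hmem x |>.1 hxK).2 rfl
    · intro z
      constructor
      · intro hz
        rcases List.mem_cons.mp hz with h | h
        · subst h; exact List.mem_cons_self
        · exact List.mem_cons_of_mem _ ((hmem z).1 h).1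
      · intro hz
        rcases List.mem_cons.mp hz with h | h
        · subst h; exact List.mem_cons_self
        · by_cases hzx : z = x
          · subst hzx; exact List.mem_cons_self
          · exact List.mem_cons_of_mem _ ((hmem z).2 ⟨h, hzx⟩)
    · rw [List.foldl_cons, hstep, heq]
      have hcx : (1 : Int) + ((xs.count x : Nat) : Int) = (((x :: xs).count x : Nat) : Int) := by
        rw [List.count_cons_self]; push_cast; ring
      simp only [List.map_cons, List.nil_append, ← hcx]
      congr 1
      apply List.map_congr_left
      intro k hk
      have hne : k ≠ x := (hmem k |>.1 hk).2
      simp [hne.symm]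

theorem dict_size_eq_keys_length {κ ν : Type} [BEq κ] (d : PySem.Dict κ ν) :
    d.size = d.keys.length := by
  simp [PySem.Dict.size, PySem.Dict.keys]

theorem solution_eq_alt (clothes : List (List String)) :
    solution clothes = solution_alt clothes := by
  simp only [solution, solution_alt]
  have hkF : (fun c : List String => (PySem.List.pyGet? c 1).getD "") = keyF := rfl
  rw [hkF]
  -- names
  set cats := clothes.map keyF with hcatsdef
  set dic1 := clothes.foldl solutionStepA PySem.Dict.empty with hdic
  set S := PySem.Set.ofList cats with hSdef
  set scats := PySem.List.sorted cats (fun x => x) false with hscat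
  have hkeys : dic1.keys = S := A_keys clothes
  have hnodS : S.Nodup := PySem.Set.nodup_ofList cats
  have hnodk : dic1.keys.Nodup := by rw [hkeys]; exact hnodS
  have hsize : dic1.size = S.length := by rw [dict_size_eq_keys_length, hkeys]
  have hsp : scats.Perm cats := PySem.List.sorted_perm cats (fun x => x) false
  have hpw : scats.Pairwise (· ≤ ·) := by
    simpa using PySem.List.sorted_pairwise cats (fun x => x)
  obtain ⟨K, hndK, hmemK, hfin⟩ := B_main scats hpw
  have hfix : K.map (fun k => (scats.count k : Int)) = K.map (fun k => (cats.count k : Int)) :=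
    List.map_congr_left fun k _ => by rw [hsp.count_eq]
  have hfin' : (if (scats.foldl solutionStepB ([], none, 0)).2.2 > 0 then
        (scats.foldl solutionStepB ([], none, 0)).1 ++ [(scats.foldl solutionStepB ([], none, 0)).2.2]
      else (scats.foldl solutionStepB ([], none, 0)).1)
      = K.map (fun k => (cats.count k : Int)) := by
    rw [← hfix, ← hfin]; rfl
  have hKS : K.Perm S := by
    refine (List.perm_ext_iff_of_nodup hndK hnodS).2 fun y => ?_
    rw [hmemK, hSdef, PySem.Set.mem_ofList, hscat, PySem.List.mem_sorted]
  have hlen : K.length = S.length := hKS.length_eq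
  have hlenk : ∀ k, ((dic1.getD k []).length : Int) = (cats.count k : Int) := fun k => by
    rw [hdic, A_len]
  have hvals : dic1.values = S.map (fun k => dic1.getD k []) := by
    rw [← hkeys]; exact PySem.Dict.values_eq_map_keys dic1 hnodk []
  rw [hfin', hsize, List.length_map, hlen]
  by_cases hone : S.length = 1
  · rw [if_pos hone, if_pos hone]
    obtain ⟨s0, hS1⟩ := List.length_eq_one_iff.mp hone
    have hK1 : K = [s0] := List.perm_singleton.mp (hS1 ▸ hKS)
    rw [hkeys, hS1, hK1]
    have hg : (PySem.List.pyGet? [s0] (0 : Int)).getD "" = s0 := by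
      simp [PySem.List.pyGet?, PySem.List.pyIdx?]
    rw [hg, ← PySem.Dict.getD_eq_get?_getD]
    have hg2 : (PySem.List.pyGet? ([s0].map (fun k => (cats.count k : Int))) (0 : Int)).getD 0
        = (cats.count s0 : Int) := by
      simp [PySem.List.pyGet?, PySem.List.pyIdx?]
    rw [hg2, hlenk]
  · rw [if_neg hone, if_neg hone]
    rw [PySem.List.foldl_pyRange_zero_pyGetD' dic1.values []
      (fun acc v => acc + (v.length : Int)) 0]
    rw [PySem.List.foldl_pyRange_zero_pyGetD' dic1.values []
      (fun acc v => acc * (v.length : Int)) 1]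
    rw [PySem.List.foldl_prod_mk (fun a n => a + n) (fun a n => a * n)]
    rw [hvals, List.foldl_map, List.foldl_map]
    have h1 : (fun (a : Int) k => a + ((dic1.getD k []).length : Int))
        = fun (a : Int) k => a + (cats.count k : Int) := by
      funext a k; rw [hlenk]
    have h2 : (fun (a : Int) k => a * ((dic1.getD k []).length : Int))
        = fun (a : Int) k => a * (cats.count k : Int) := by
      funext a k; rw [hlenk]
    rw [h1, h2]
    have hArw : ∀ (g : Int → Int → Int) (i : Int),
        S.foldl (fun a k => g a ((cats.count k : Int))) i
          = (S.map (fun k => (cats.count k : Int))).foldl g i := fun g i =>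
      List.foldl_map.symm
    rw [hArw (fun a n => a + n) 0, hArw (fun a n => a * n) 1]
    rw [foldl_add0, foldl_mul1, foldl_add0, foldl_mul1]
    have hsum : (K.map (fun k => (cats.count k : Int))).sum
        = (S.map (fun k => (cats.count k : Int))).sum := (hKS.map _).sum_eq
    have hprod : (K.map (fun k => (cats.count k : Int))).prod
        = (S.map (fun k => (cats.count k : Int))).prod := (hKS.map _).prod_eq
    rw [hsum, hprod]

-- ===== VERDICT (by name: the statement is the Claim_ definition above) =====
theorem solution_spec : Claim_equal_solution := by
  intro clothes _ _
  exact solution_eq_alt clothes
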